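-- pv_equiv track=rewrite | github.com/navanni/SP24_Portfolio | vigenere_cipher.py | format_key
-- ===== SOURCE A (Python) =====
-- def format_key(message, key='THEQUICKBROWNFOXJUMPSOVERTHELAZYDOG'):
--     """
--     Takes input message and key, formats the key so it is all caps, has no spaces,  and is the same length as the message.
--     If the key is shorter than the message, it repeats until they are the same length or truncates if longer than the message
--
--     Parameters
--     ----------
--     message: str
--         message to be encrypted/decrypted using Vigenère cipher
--     key: str, optional
--         used to determine which Caesar shift cipher is used to encrypt/decript that particular character.
--         Can be set to anything but has a defualt that is used if nothing is provided
--
--     """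
--     key = key.upper()
--     formatted_key = ""
--     key_index = 0
--     for i in range(len(message)):
--         if message[i].isalpha():
--             formatted_key += key[key_index % len(key)]
--             key_index += 1
--
--     return formatted_key
-- ===== SOURCE B (Python) =====
-- def format_key(message, key='THEQUICKBROWNFOXJUMPSOVERTHELAZYDOG'):
--     count = sum(1 for c in message if c.isalpha())
--     ku = key.upper()
--     return ''.join(ku[i % len(ku)] for i in range(count))
-- ===== Notes on version B (the rewrite author's own statement) =====
-- stated objective: simpler
-- what changed: B counts the alphabetic characters in one pass and then builds the key by a modular comprehension over range(count), never indexing the message and never carrying a key_index accumulator.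
import Mathlib
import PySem

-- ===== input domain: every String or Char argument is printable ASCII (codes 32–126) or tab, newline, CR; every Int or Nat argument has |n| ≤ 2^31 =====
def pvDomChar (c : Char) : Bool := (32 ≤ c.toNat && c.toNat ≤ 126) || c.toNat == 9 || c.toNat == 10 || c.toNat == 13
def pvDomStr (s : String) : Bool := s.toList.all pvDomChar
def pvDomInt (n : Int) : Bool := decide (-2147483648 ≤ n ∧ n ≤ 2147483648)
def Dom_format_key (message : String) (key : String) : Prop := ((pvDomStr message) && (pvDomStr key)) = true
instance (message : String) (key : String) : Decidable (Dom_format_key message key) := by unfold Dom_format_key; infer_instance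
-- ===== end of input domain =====

-- B counts alphabetic characters once, then builds the key by a modular comprehension; same return value as A on Pre_.

-- ===== PORT A =====
-- A: key = key.upper(); loop i over range(len(message)); on alpha chars append key[key_index % len(key)] and bump key_index.
def format_key (message : String) (key : String) : String :=
  let keyU := (PySem.Str.upper key).toList
  let r := (PySem.List.pyRange 0 (PySem.Str.len message) 1).foldl
    (fun (st : List Char × Int) i =>
      let c := PySem.List.pyGetD message.toList i ' '   -- message[i]; i is in range, default never used
      if PySem.Chars.isalpha c then
        (st.1 ++ [PySem.List.pyGetD keyU (PySem.Int.mod st.2 (keyU.length : Int)) ' '], st.2 + 1)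
      else st) ([], 0)
  String.ofList r.1

-- ===== PORT B =====
-- B: count = sum(1 for c in message if c.isalpha()); ''.join(ku[i % len(ku)] for i in range(count))
def format_key_alt (message : String) (key : String) : String :=
  let count := message.toList.countP PySem.Chars.isalpha
  let ku := (PySem.Str.upper key).toList
  String.ofList ((List.range count).map (fun i => ku.getD (i % ku.length) ' '))

-- ===== PRECONDITION & SPEC =====
-- Pre_ excludes an empty key together with a message containing an alphabetic character:
-- there Python A (and B) raise ZeroDivisionError on key_index % len(key).
def Pre_format_key (message : String) (key : String) : Prop :=
  message.toList.all (fun c => !PySem.Chars.isalpha c) = true ∨ key.toList ≠ []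
instance (message : String) (key : String) : Decidable (Pre_format_key message key) := by
  unfold Pre_format_key; infer_instance

def pvWitness_format_key : String × String := ("ab", "k")

def Spec_format_key (message : String) (key : String) (out : String) : Prop := out = format_key_alt message key
instance (message : String) (key : String) (out : String) : Decidable (Spec_format_key message key out) := by unfold Spec_format_key; infer_instance

-- ===== CLAIM (what is proved, stated in full; the proofs are below) =====
def Claim_equal_format_key : Prop := ∀ (message : String) (key : String), Dom_format_key message key → Pre_format_key message key → Spec_format_key message key (format_key message key)

-- ===== LEMMAS AND PROOFS =====

-- A's loop over the message characters, with the state generalized: the accumulated key is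
-- acc followed by B's modular comprehension shifted by the current key_index.
theorem format_key_loop (keyU : List Char) (cs : List Char) (acc : List Char) (ki : Nat) :
    cs.foldl
      (fun (st : List Char × Int) c =>
        if PySem.Chars.isalpha c then
          (st.1 ++ [PySem.List.pyGetD keyU (PySem.Int.mod st.2 (keyU.length : Int)) ' '], st.2 + 1)
        else st) (acc, (ki : Int))
    = (acc ++ (List.range (cs.countP PySem.Chars.isalpha)).map
          (fun i => keyU.getD ((ki + i) % keyU.length) ' '),
       ((ki + cs.countP PySem.Chars.isalpha : Nat) : Int)) := by
  induction cs generalizing acc ki with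
  | nil => simp
  | cons c cs ih =>
    simp only [List.foldl_cons, List.countP_cons]
    by_cases h : PySem.Chars.isalpha c = true
    · rw [if_pos h]
      have hcast : ((ki : Int) + 1) = ((ki + 1 : Nat) : Int) := by push_cast; ring
      rw [hcast, ih]
      have hmod : PySem.Int.mod (ki : Int) (keyU.length : Int)
          = ((ki % keyU.length : Nat) : Int) := PySem.Int.mod_natCast ki keyU.length
      simp only [Prod.mk.injEq]
      constructor
      · rw [hmod, PySem.List.pyGetD_natCast]
        simp only [h, if_true]
        rw [List.range_succ_eq_map, List.map_cons, List.map_map]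
        simp only [List.append_assoc, List.singleton_append]
        simp only [Function.comp_def, Nat.succ_eq_add_one, Nat.add_zero]
        simp only [show ∀ i : ℕ, ki + 1 + i = ki + (i + 1) from fun i => by omega]
      · simp [h]; omega
    · rw [if_neg h, ih]
      simp [h]

-- ===== VERDICT (by name: the statement is the Claim_ definition above) =====

theorem format_key_spec : Claim_equal_format_key := by
  intro message key _ _
  unfold Spec_format_key format_key format_key_alt
  simp only [PySem.Str.len_eq]
  rw [PySem.List.foldl_pyRange_zero_pyGetD' message.toList ' '
        (fun (st : List Char × Int) c =>
          if PySem.Chars.isalpha c then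
            (st.1 ++ [PySem.List.pyGetD (PySem.Str.upper key).toList
                (PySem.Int.mod st.2 (((PySem.Str.upper key).toList.length : Nat) : Int)) ' '], st.2 + 1)
          else st) ([], 0)]
  have h0 : (0 : Int) = ((0 : Nat) : Int) := rfl
  rw [h0, format_key_loop]
  simp
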